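-- pv_equiv track=rewrite | github.com/OpenAfterHours/rwa_calculator | tests/benchmarks/profile_plan.py | count_plan_nodes
-- ===== SOURCE A (Python) =====
-- def count_plan_nodes(plan_str: str) -> dict[str, int]:
--     """Count operations in a query plan string."""
--     lines = plan_str.strip().split("\n")
--     return {
--         "total_lines": len(lines),
--         "joins": sum(1 for line in lines if "JOIN" in line.upper()),
--         "filters": sum(1 for line in lines if "FILTER" in line or "σ" in line),
--         "projections": sum(
--             1 for line in lines if "PROJECT" in line or "π" in line or "SELECT" in line
--         ),
--         "with_columns": sum(
--             1 for line in lines if "WITH_COLUMNS" in line or "WITH COLUMNS" in line.upper()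
--         ),
--         "group_by": sum(1 for line in lines if "GROUP" in line.upper() or "AGG" in line.upper()),
--         "unions": sum(1 for line in lines if "UNION" in line.upper() or "CONCAT" in line.upper()),
--         "sorts": sum(1 for line in lines if "SORT" in line.upper()),
--     }
-- ===== SOURCE B (Python) =====
-- def count_plan_nodes(plan_str: str) -> dict[str, int]:
--     """Count operations in a query plan string (single pass over the lines)."""
--     lines = plan_str.strip().split("\n")
--     joins = filters = projections = with_columns = group_by = unions = sorts = 0
--     for line in lines:
--         u = line.upper()
--         if "JOIN" in u:
--             joins += 1
--         if "FILTER" in line or "σ" in line: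
--             filters += 1
--         if "PROJECT" in line or "π" in line or "SELECT" in line:
--             projections += 1
--         if "WITH_COLUMNS" in line or "WITH COLUMNS" in u:
--             with_columns += 1
--         if "GROUP" in u or "AGG" in u:
--             group_by += 1
--         if "UNION" in u or "CONCAT" in u:
--             unions += 1
--         if "SORT" in u:
--             sorts += 1
--     return {
--         "total_lines": len(lines),
--         "joins": joins,
--         "filters": filters,
--         "projections": projections,
--         "with_columns": with_columns,
--         "group_by": group_by,
--         "unions": unions,
--         "sorts": sorts,
--     }
-- ===== Notes on version B (the rewrite author's own statement) =====
-- stated objective: alternative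
-- what changed: Replaces eight separate generator passes over the lines (each recomputing line.upper()) with a single loop that uppercases each line once and increments seven counters simultaneously.
import Mathlib
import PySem

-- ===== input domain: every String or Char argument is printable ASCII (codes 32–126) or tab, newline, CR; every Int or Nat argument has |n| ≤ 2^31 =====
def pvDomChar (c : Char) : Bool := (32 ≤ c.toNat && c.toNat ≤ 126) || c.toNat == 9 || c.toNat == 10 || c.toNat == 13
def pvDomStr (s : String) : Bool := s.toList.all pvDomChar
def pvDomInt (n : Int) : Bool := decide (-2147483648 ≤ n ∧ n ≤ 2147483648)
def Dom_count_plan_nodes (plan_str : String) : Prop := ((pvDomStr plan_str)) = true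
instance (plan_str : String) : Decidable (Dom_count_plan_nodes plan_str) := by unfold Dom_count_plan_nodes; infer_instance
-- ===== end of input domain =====

-- B replaces A's eight separate passes over the lines with one loop that uppercases each line once
-- and increments seven counters simultaneously (objective: alternative decomposition).


-- ===== PORT A =====
-- Literal port of A: strip + split, then a dict literal whose values are eight
-- independent passes over `lines` (sum(1 for line in lines if …) = countP).
def count_plan_nodes (plan_str : String) : List (String × Int) :=
  let lines := PySem.Chars.splitOn (PySem.Chars.strip plan_str.toList) "\n".toList
  [("total_lines", (lines.length : Int)),
   ("joins", (lines.countP (fun line => PySem.Chars.isIn "JOIN".toList (PySem.Chars.upper line)) : Int)),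
   ("filters", (lines.countP (fun line => PySem.Chars.isIn "FILTER".toList line || PySem.Chars.isIn "σ".toList line) : Int)),
   ("projections", (lines.countP (fun line => PySem.Chars.isIn "PROJECT".toList line || PySem.Chars.isIn "π".toList line || PySem.Chars.isIn "SELECT".toList line) : Int)),
   ("with_columns", (lines.countP (fun line => PySem.Chars.isIn "WITH_COLUMNS".toList line || PySem.Chars.isIn "WITH COLUMNS".toList (PySem.Chars.upper line)) : Int)),
   ("group_by", (lines.countP (fun line => PySem.Chars.isIn "GROUP".toList (PySem.Chars.upper line) || PySem.Chars.isIn "AGG".toList (PySem.Chars.upper line)) : Int)),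
   ("unions", (lines.countP (fun line => PySem.Chars.isIn "UNION".toList (PySem.Chars.upper line) || PySem.Chars.isIn "CONCAT".toList (PySem.Chars.upper line)) : Int)),
   ("sorts", (lines.countP (fun line => PySem.Chars.isIn "SORT".toList (PySem.Chars.upper line)) : Int))]

-- ===== PORT B =====
-- One loop body: uppercase the line once, bump each of the seven counters conditionally.
def cpnStep (acc : Int × Int × Int × Int × Int × Int × Int) (line : List Char) :
    Int × Int × Int × Int × Int × Int × Int :=
  let u := PySem.Chars.upper line
  let (j, f, p, w, g, un, s) := acc
  (if PySem.Chars.isIn "JOIN".toList u then j + 1 else j,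
   if PySem.Chars.isIn "FILTER".toList line || PySem.Chars.isIn "σ".toList line then f + 1 else f,
   if PySem.Chars.isIn "PROJECT".toList line || PySem.Chars.isIn "π".toList line || PySem.Chars.isIn "SELECT".toList line then p + 1 else p,
   if PySem.Chars.isIn "WITH_COLUMNS".toList line || PySem.Chars.isIn "WITH COLUMNS".toList u then w + 1 else w,
   if PySem.Chars.isIn "GROUP".toList u || PySem.Chars.isIn "AGG".toList u then g + 1 else g,
   if PySem.Chars.isIn "UNION".toList u || PySem.Chars.isIn "CONCAT".toList u then un + 1 else un,
   if PySem.Chars.isIn "SORT".toList u then s + 1 else s)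

def count_plan_nodes_alt (plan_str : String) : List (String × Int) :=
  let lines := PySem.Chars.splitOn (PySem.Chars.strip plan_str.toList) "\n".toList
  let c := lines.foldl cpnStep (0, 0, 0, 0, 0, 0, 0)
  [("total_lines", (lines.length : Int)),
   ("joins", c.1), ("filters", c.2.1), ("projections", c.2.2.1),
   ("with_columns", c.2.2.2.1), ("group_by", c.2.2.2.2.1),
   ("unions", c.2.2.2.2.2.1), ("sorts", c.2.2.2.2.2.2)]

-- ===== PRECONDITION & SPEC =====
def Spec_count_plan_nodes (plan_str : String) (out : List (String × Int)) : Prop := out = count_plan_nodes_alt plan_str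
instance (plan_str : String) (out : List (String × Int)) : Decidable (Spec_count_plan_nodes plan_str out) := by unfold Spec_count_plan_nodes; infer_instance

-- ===== CLAIM (what is proved, stated in full; the proofs are below) =====
def Claim_equal_count_plan_nodes : Prop := ∀ (plan_str : String), Dom_count_plan_nodes plan_str → Spec_count_plan_nodes plan_str (count_plan_nodes plan_str)

-- ===== LEMMAS AND PROOFS =====

-- The single-pass fold computes the seven countP values of A, shifted by the accumulator.
lemma cpn_fold (l : List (List Char)) (a b c d e f g : Int) :
    l.foldl cpnStep (a, b, c, d, e, f, g) =
      (a + (l.countP (fun line => PySem.Chars.isIn "JOIN".toList (PySem.Chars.upper line)) : Int),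
       b + (l.countP (fun line => PySem.Chars.isIn "FILTER".toList line || PySem.Chars.isIn "σ".toList line) : Int),
       c + (l.countP (fun line => PySem.Chars.isIn "PROJECT".toList line || PySem.Chars.isIn "π".toList line || PySem.Chars.isIn "SELECT".toList line) : Int),
       d + (l.countP (fun line => PySem.Chars.isIn "WITH_COLUMNS".toList line || PySem.Chars.isIn "WITH COLUMNS".toList (PySem.Chars.upper line)) : Int),
       e + (l.countP (fun line => PySem.Chars.isIn "GROUP".toList (PySem.Chars.upper line) || PySem.Chars.isIn "AGG".toList (PySem.Chars.upper line)) : Int),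
       f + (l.countP (fun line => PySem.Chars.isIn "UNION".toList (PySem.Chars.upper line) || PySem.Chars.isIn "CONCAT".toList (PySem.Chars.upper line)) : Int),
       g + (l.countP (fun line => PySem.Chars.isIn "SORT".toList (PySem.Chars.upper line)) : Int)) := by
  induction l generalizing a b c d e f g with
  | nil => simp
  | cons x xs ih =>
      simp only [List.foldl_cons, List.countP_cons, cpnStep, ih]
      refine Prod.ext ?_ (Prod.ext ?_ (Prod.ext ?_ (Prod.ext ?_ (Prod.ext ?_ (Prod.ext ?_ ?_))))) <;>
        simp <;> split_ifs <;> omega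

-- ===== VERDICT (by name: the statement is the Claim_ definition above) =====
theorem count_plan_nodes_spec : Claim_equal_count_plan_nodes := by
  intro plan_str _
  unfold Spec_count_plan_nodes count_plan_nodes count_plan_nodes_alt
  simp [cpn_fold]
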